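-- pv_equiv track=rewrite | github.com/Garcel/advent_of_code | 2021/3/2/main.py | filter_c02_values
-- ===== SOURCE A (Python) =====
-- def filter_c02_values(values: list, pos: int) -> list:
--     new_values = []
--     less_repeated_bit_at_pos = get_less_repeated_bit_at_pos(pos, values)
--
--     for value in values:
--         if int(value[pos]) != less_repeated_bit_at_pos:
--             continue
--
--         new_values.append(value)
--
--     return new_values
--
-- def get_less_repeated_bit_at_pos(pos, values):
--     count_zero = 0
--     count_one = 0
--
--     for value in values:
--         if value[pos] == '0':
--             count_zero += 1
--         else:
--             count_one += 1
--
--     return 0 if count_zero <= count_one else 1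
-- ===== SOURCE B (Python) =====
-- def filter_c02_values(values: list, pos: int) -> list:
--     groups = {}
--     for v in values:
--         groups.setdefault(v[pos], []).append(v)
--     zeros = groups.get('0', [])
--     if 2 * len(zeros) <= len(values):
--         return zeros
--     return groups.get('1', [])
-- ===== Notes on version B (the rewrite author's own statement) =====
-- stated objective: alternative
-- what changed: Replaced the count-then-filter structure (two-counter helper pass plus an int()-based filtering pass) with a single bucketing pass that groups entries into a dict of lists keyed by the character at pos, then returns the '0' bucket or the '1' bucket chosen by one length comparison — no filtering scan remains.
import Mathlib
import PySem

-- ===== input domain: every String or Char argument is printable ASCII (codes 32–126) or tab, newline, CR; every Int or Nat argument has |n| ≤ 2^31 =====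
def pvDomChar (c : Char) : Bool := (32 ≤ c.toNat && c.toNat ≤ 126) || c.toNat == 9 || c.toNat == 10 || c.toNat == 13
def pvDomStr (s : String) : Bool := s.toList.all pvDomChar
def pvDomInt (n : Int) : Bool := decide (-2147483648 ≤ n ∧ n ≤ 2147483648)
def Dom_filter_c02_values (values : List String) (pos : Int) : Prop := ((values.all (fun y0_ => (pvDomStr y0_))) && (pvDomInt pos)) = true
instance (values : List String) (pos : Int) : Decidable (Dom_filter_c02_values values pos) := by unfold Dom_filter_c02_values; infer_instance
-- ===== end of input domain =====

-- B is an alternative decomposition: one bucketing pass into a dict of lists keyed by the char at pos,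
-- then the '0' or '1' bucket is returned after one length comparison; same cost as A.

-- ===== PORT A =====
-- helper get_less_repeated_bit_at_pos: two counters in one loop, then tie-goes-to-0 choice
def get_less_repeated_bit_at_pos (pos : Int) (values : List String) : Int :=
  let cnt := values.foldl
    (fun (acc : Int × Int) v =>
      if PySem.Str.pyGet? v pos = some '0' then (acc.1 + 1, acc.2) else (acc.1, acc.2 + 1))
    (0, 0)
  if cnt.1 ≤ cnt.2 then 0 else 1

def filter_c02_values (values : List String) (pos : Int) : List String :=
  let bit := get_less_repeated_bit_at_pos pos values
  values.foldl
    (fun acc v =>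
      -- int(value[pos]) != bit: pyGet? none = IndexError, ofStr? none = ValueError (both outside Pre_)
      if (PySem.Str.pyGet? v pos).bind (fun c => PySem.Int.ofStr? (String.singleton c)) ≠ some bit
      then acc else acc ++ [v])
    []

-- ===== PORT B =====
-- groups.setdefault(v[pos], []).append(v): keys are v[pos] (Option Char: none = IndexError, outside Pre_)
def filter_c02_values_alt (values : List String) (pos : Int) : List String :=
  let groups := values.foldl
    (fun (d : PySem.Dict (Option Char) (List String)) v =>
      d.modify (PySem.Str.pyGet? v pos) [] (· ++ [v]))
    PySem.Dict.empty
  let zeros := groups.getD (some '0') []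
  if 2 * zeros.length ≤ values.length then zeros
  else groups.getD (some '1') []

-- ===== PRECONDITION & SPEC =====
-- Pre_: exactly where Python A returns normally, i.e. A's two raise conditions do not fire:
-- value[pos] exists (else IndexError) and int(value[pos]) parses (else ValueError).
def Pre_filter_c02_values (values : List String) (pos : Int) : Prop :=
  ∀ v ∈ values,
    ((PySem.Str.pyGet? v pos).bind (fun c => PySem.Int.ofStr? (String.singleton c))).isSome = true
instance (values : List String) (pos : Int) : Decidable (Pre_filter_c02_values values pos) := by
  unfold Pre_filter_c02_values; infer_instance

def pvWitness_filter_c02_values : List String × Int := (["0", "1"], 0)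

def Spec_filter_c02_values (values : List String) (pos : Int) (out : List String) : Prop := out = filter_c02_values_alt values pos
instance (values : List String) (pos : Int) (out : List String) : Decidable (Spec_filter_c02_values values pos out) := by unfold Spec_filter_c02_values; infer_instance

-- ===== CLAIM (what is proved, stated in full; the proofs are below) =====
def Claim_equal_filter_c02_values : Prop := ∀ (values : List String) (pos : Int), Dom_filter_c02_values values pos → Pre_filter_c02_values values pos → Spec_filter_c02_values values pos (filter_c02_values values pos)

-- ===== LEMMAS AND PROOFS =====

-- the two counters of A's helper: first = number of '0's at pos, second = the rest
theorem pv_count_pair (pos : Int) (l : List String) (a b : Int) :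
    l.foldl
      (fun (acc : Int × Int) v =>
        if PySem.Str.pyGet? v pos = some '0' then (acc.1 + 1, acc.2) else (acc.1, acc.2 + 1))
      (a, b)
    = (a + (l.countP (fun v => PySem.Str.pyGet? v pos == some '0') : Int),
       b + ((l.length : Int) - (l.countP (fun v => PySem.Str.pyGet? v pos == some '0') : Int))) := by
  induction l generalizing a b with
  | nil => simp
  | cons x xs ih =>
      rw [List.foldl_cons]
      by_cases h : PySem.Str.pyGet? x pos = some '0'
      · have hc : (PySem.Str.pyGet? x pos == some '0') = true := by simpa using h
        rw [if_pos h, ih, List.countP_cons, List.length_cons, if_pos hc]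
        refine Prod.ext ?_ ?_ <;> push_cast <;> ring
      · have hc : (PySem.Str.pyGet? x pos == some '0') = false := by simpa using h
        rw [if_neg h, ih, List.countP_cons, List.length_cons, if_neg (by simpa using h)]
        refine Prod.ext ?_ ?_ <;> push_cast <;> ring

-- A's selection bit, rephrased as a length test on the '0' group
theorem pv_bit_eq (pos : Int) (values : List String) :
    get_less_repeated_bit_at_pos pos values
    = if 2 * (values.countP (fun v => PySem.Str.pyGet? v pos == some '0')) ≤ values.length
      then 0 else 1 := by
  unfold get_less_repeated_bit_at_pos
  rw [pv_count_pair]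
  have hle : values.countP (fun v => PySem.Str.pyGet? v pos == some '0') ≤ values.length :=
    List.countP_le_length
  by_cases h : 2 * (values.countP (fun v => PySem.Str.pyGet? v pos == some '0')) ≤ values.length
  · simp only [if_pos h]; rw [if_pos]; omega
  · simp only [if_neg h]; rw [if_neg]; omega

-- B's bucket for key c is exactly the order-preserving filter on "char at pos = c"
theorem pv_group_aux (pos : Int) (l : List String)
    (d : PySem.Dict (Option Char) (List String)) (c : Char) :
    (l.foldl
      (fun (d : PySem.Dict (Option Char) (List String)) v =>
        d.modify (PySem.Str.pyGet? v pos) [] (· ++ [v])) d).getD (some c) []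
    = d.getD (some c) [] ++ l.filter (fun v => PySem.Str.pyGet? v pos == some c) := by
  induction l generalizing d with
  | nil => simp
  | cons x xs ih =>
      rw [List.foldl_cons, ih, List.filter_cons]
      by_cases h : PySem.Str.pyGet? x pos = some c
      · rw [h, if_pos (by simp)]
        rw [PySem.Dict.getD_modify, if_pos rfl]
        simp
      · rw [if_neg (by simpa using h)]
        rw [PySem.Dict.getD_modify, if_neg (fun he => h he.symm)]

theorem pv_group (pos : Int) (values : List String) (c : Char) :
    (values.foldl
      (fun (d : PySem.Dict (Option Char) (List String)) v =>
        d.modify (PySem.Str.pyGet? v pos) [] (· ++ [v]))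
      PySem.Dict.empty).getD (some c) []
    = values.filter (fun v => PySem.Str.pyGet? v pos == some c) := by
  rw [pv_group_aux]
  simp [PySem.Dict.getD_empty]

-- a printable-ASCII char whose singleton string parses as an int is one of the ten digit chars
theorem pv_digit_char (c : Char) (hdom : pvDomChar c = true)
    (hs : (PySem.Int.ofStr? (String.singleton c)).isSome = true) :
    c ∈ ['0','1','2','3','4','5','6','7','8','9'] := by
  have hb : c.toNat < 127 := by
    simp [pvDomChar] at hdom; omega
  have key : ∀ n < 127, (PySem.Int.ofStr? (String.singleton (Char.ofNat n))).isSome = true →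
      Char.ofNat n ∈ ['0','1','2','3','4','5','6','7','8','9'] := by decide
  have h := key c.toNat hb
  rw [Char.ofNat_toNat] at h
  exact h hs

-- under Pre_ and the ASCII domain, A's int(value[pos]) == 0/1 test is exactly "char at pos is '0'/'1'"
theorem pv_digit_test (pos : Int) (v : String) (hdom : pvDomStr v = true)
    (h : ((PySem.Str.pyGet? v pos).bind (fun c => PySem.Int.ofStr? (String.singleton c))).isSome = true)
    (b : Char) (hb : b = '0' ∨ b = '1') :
    (decide ((PySem.Str.pyGet? v pos).bind (fun c => PySem.Int.ofStr? (String.singleton c))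
        = some (if b = '0' then (0 : Int) else 1)))
    = (PySem.Str.pyGet? v pos == some b) := by
  cases hg : PySem.Str.pyGet? v pos with
  | none => rw [hg] at h; simp at h
  | some c =>
      rw [hg] at h
      have hc : c ∈ v.toList := PySem.List.mem_of_pyGet?_eq_some (v.toList) (by simpa using hg)
      have hdc : pvDomChar c = true := by
        have := List.all_eq_true.mp (by simpa [pvDomStr] using hdom)
        exact this c hc
      have hd := pv_digit_char c hdc (by simpa using h)
      fin_cases hd <;> rcases hb with hb | hb <;> subst hb <;> decide

theorem filter_c02_values_spec' (values : List String) (pos : Int)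
    (hdom : Dom_filter_c02_values values pos)
    (hpre : Pre_filter_c02_values values pos) :
    filter_c02_values values pos = filter_c02_values_alt values pos := by
  have hstr : ∀ v ∈ values, pvDomStr v = true := by
    have := hdom
    unfold Dom_filter_c02_values at this
    simp only [Bool.and_eq_true, List.all_eq_true] at this
    exact fun v hv => this.1 v hv
  unfold filter_c02_values filter_c02_values_alt
  rw [pv_bit_eq]; simp only [pv_group]
  rw [List.countP_eq_length_filter]
  by_cases hsel : 2 * (values.filter (fun v => PySem.Str.pyGet? v pos == some '0')).length
      ≤ values.length
  · rw [if_pos hsel, if_pos (by simpa [List.countP_eq_length_filter] using hsel)]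
    simp only [ne_eq, ite_not]
    rw [PySem.List.foldl_append_ite_eq_filter]
    simp only [List.nil_append]
    apply List.filter_congr
    intro v hv
    have := pv_digit_test pos v (hstr v hv) (hpre v hv) '0' (Or.inl rfl)
    simpa using this
  · rw [if_neg hsel, if_neg (by simpa [List.countP_eq_length_filter] using hsel)]
    simp only [ne_eq, ite_not]
    rw [PySem.List.foldl_append_ite_eq_filter]
    simp only [List.nil_append]
    apply List.filter_congr
    intro v hv
    have := pv_digit_test pos v (hstr v hv) (hpre v hv) '1' (Or.inr rfl)
    simpa using this

-- ===== VERDICT (by name: the statement is the Claim_ definition above) =====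
theorem filter_c02_values_spec : Claim_equal_filter_c02_values := by
  intro values pos hdom hpre
  exact filter_c02_values_spec' values pos hdom hpre
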